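-- pv_equiv track=rewrite | github.com/pypi-data/pypi-mirror-376 | packages/seshatdatasetanalysis/seshatdatasetanalysis-0.2.8-py3-none-any.whl/seshatdatasetanalysis/Template.py | reduce_to_largest_ranges
-- ===== SOURCE A (Python) =====
-- def reduce_to_largest_ranges(values):
--     # Initialize a list to store the (min, max) tuples
--     result = []
--
--     # Get the length of the inner lists (assuming all inner lists have the same length)
--     num_points = len(values[0])
--
--     # Iterate through the indices of the inner lists
--     for i in range(num_points):
--         # Initialize min and max values for the current index
--         min_value = float('inf')
--         max_value = float('-inf')
--
--         # Iterate through the outer list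
--         for inner_list in values:
--             # Get the tuple at the current index
--             x1, x2 = inner_list[i]
--
--             # Update min and max values
--             min_value = min(min_value, x1)
--             max_value = max(max_value, x2)
--
--         # Append the (min, max) tuple to the result list
--         result.append((min_value, max_value))
--
--     # Return the result list
--     return result
-- ===== SOURCE B (Python) =====
-- def reduce_to_largest_ranges(values):
--     # Single row-wise pass: seed the accumulator with the first row's tuples,
--     # then merge each subsequent row into it elementwise (min of lows, max of highs).
--     acc = [(x1, x2) for (x1, x2) in values[0]]
--     for row in values[1:]:
--         acc = [(min(a, row[i][0]), max(b, row[i][1])) for i, (a, b) in enumerate(acc)]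
--     return acc
-- ===== Notes on version B (the rewrite author's own statement) =====
-- stated objective: alternative
-- what changed: B makes a single row-wise pass: it seeds an accumulator list with the first row's tuples and merges each subsequent row into it elementwise, instead of A's column-wise double loop over indices with float('inf')/float('-inf') accumulators.
import Mathlib
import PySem

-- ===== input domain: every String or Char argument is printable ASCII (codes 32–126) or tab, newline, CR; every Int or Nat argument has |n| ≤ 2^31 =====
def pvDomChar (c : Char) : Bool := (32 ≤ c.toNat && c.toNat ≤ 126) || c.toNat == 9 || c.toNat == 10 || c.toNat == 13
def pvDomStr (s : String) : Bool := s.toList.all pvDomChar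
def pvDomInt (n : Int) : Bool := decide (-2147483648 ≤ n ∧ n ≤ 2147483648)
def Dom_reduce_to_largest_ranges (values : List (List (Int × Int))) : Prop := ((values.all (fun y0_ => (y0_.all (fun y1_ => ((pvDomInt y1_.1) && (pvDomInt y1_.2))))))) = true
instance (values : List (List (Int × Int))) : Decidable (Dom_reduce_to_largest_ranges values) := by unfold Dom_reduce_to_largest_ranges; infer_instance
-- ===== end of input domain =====

-- B replaces A's column-wise double loop by a single row-wise pass merging each row
-- into an accumulator list; objective: alternative (same cost as A).

-- ===== PORT A =====
-- float('inf') / float('-inf') accumulators are modeled as Option.none (exact here: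
-- under Pre_ values is nonempty, so the sentinel is replaced on the first inner
-- iteration and the result entries are the same integers Python returns).
def reduce_to_largest_ranges (values : List (List (Int × Int))) : List (Int × Int) :=
  let num_points : Int := ((values.headD []).length : Int)
  (PySem.List.pyRange 0 num_points 1).foldl (fun result i =>
    let st := values.foldl (fun (mv : Option Int × Option Int) inner_list =>
      match PySem.List.pyGet? inner_list i with
      | some (x1, x2) =>
        (some (match mv.1 with | none => x1 | some m => min m x1),
         some (match mv.2 with | none => x2 | some m => max m x2))
      | none => mv)   -- IndexError: excluded by Pre_
      (none, none)
    result ++ [(st.1.getD 0, st.2.getD 0)]) []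

-- ===== PORT B =====
-- one merge step of Source B's row loop: elementwise min/max of the accumulator with row[i]
def pvMergeRow (acc row : List (Int × Int)) : List (Int × Int) :=
  (PySem.List.enumerate acc).map (fun ib =>
    match PySem.List.pyGet? row ib.1 with
    | some p => (min ib.2.1 p.1, max ib.2.2 p.2)
    | none => ib.2)   -- IndexError: excluded by Pre_

def reduce_to_largest_ranges_alt (values : List (List (Int × Int))) : List (Int × Int) :=
  match values with
  | [] => []          -- values[0] raises IndexError: excluded by Pre_
  | v :: vs =>        -- v = values[0], vs = values[1:]
    vs.foldl pvMergeRow (v.map (fun p => (p.1, p.2)))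

-- ===== PRECONDITION & SPEC =====
-- Pre_ excludes exactly the inputs on which BOTH Pythons raise IndexError:
-- the empty outer list (values[0]) and ragged inputs where some inner list is
-- shorter than values[0] (inner_list[i] / row[i]).
def Pre_reduce_to_largest_ranges (values : List (List (Int × Int))) : Prop :=
  values ≠ [] ∧ ∀ l ∈ values, (values.headD []).length ≤ l.length
instance (values : List (List (Int × Int))) : Decidable (Pre_reduce_to_largest_ranges values) := by
  unfold Pre_reduce_to_largest_ranges; infer_instance

def pvWitness_reduce_to_largest_ranges : (List (List (Int × Int))) := [[(1, 2), (3, 4)], [(0, 5), (7, 1)]]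

def Spec_reduce_to_largest_ranges (values : List (List (Int × Int))) (out : List (Int × Int)) : Prop := out = reduce_to_largest_ranges_alt values
instance (values : List (List (Int × Int))) (out : List (Int × Int)) : Decidable (Spec_reduce_to_largest_ranges values out) := by unfold Spec_reduce_to_largest_ranges; infer_instance

-- ===== CLAIM (what is proved, stated in full; the proofs are below) =====
def Claim_equal_reduce_to_largest_ranges : Prop := ∀ (values : List (List (Int × Int))), Dom_reduce_to_largest_ranges values → Pre_reduce_to_largest_ranges values → Spec_reduce_to_largest_ranges values (reduce_to_largest_ranges values)

-- ===== LEMMAS AND PROOFS =====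

-- common target shape: index k ↦ (fold of min over rows' firsts, fold of max over rows' seconds)
def pvCol (vs : List (List (Int × Int))) (a : Int × Int) (k : Nat) : Int × Int :=
  (vs.foldl (fun m row => min m (row.getD k ((0 : Int), (0 : Int))).1) a.1,
   vs.foldl (fun m row => max m (row.getD k ((0 : Int), (0 : Int))).2) a.2)

-- A's outer foldl that appends one tuple per index is a map over the range
theorem pv_foldl_append_map {α β : Type} (f : α → β) :
    ∀ (l : List α) (acc : List β), l.foldl (fun r i => r ++ [f i]) acc = acc ++ l.map f := by
  intro l
  induction l with
  | nil => simp
  | cons h t ih => intro acc; simp [List.foldl_cons, ih]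

-- A's inner fold, once both accumulators are `some`, computes fold-min / fold-max
theorem pv_fold_some (L : List (Int × Int)) :
    ∀ (a b : Int),
      L.foldl (fun (mv : Option Int × Option Int) (p : Int × Int) =>
          (some (match mv.1 with | none => p.1 | some m => min m p.1),
           some (match mv.2 with | none => p.2 | some m => max m p.2)))
        (some a, some b)
      = (some (L.foldl (fun m p => min m p.1) a), some (L.foldl (fun m p => max m p.2) b)) := by
  induction L with
  | nil => intro a b; rfl
  | cons c cs ih => intro a b; simpa using ih (min a c.1) (max b c.2)

-- one merge step, characterized entrywise
theorem pv_merge_char (acc row : List (Int × Int)) (hlen : acc.length ≤ row.length) :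
    pvMergeRow acc row
      = (List.range acc.length).map (fun k =>
          (min (acc.getD k (0, 0)).1 (row.getD k (0, 0)).1,
           max (acc.getD k (0, 0)).2 (row.getD k (0, 0)).2)) := by
  apply List.ext_getElem
  · simp [pvMergeRow, PySem.List.length_enumerate]
  · intro k hk hk'
    have hka : k < acc.length := by
      simpa [pvMergeRow, PySem.List.length_enumerate] using hk
    have hkr : k < row.length := lt_of_lt_of_le hka hlen
    simp [pvMergeRow, PySem.List.getElem_enumerate, PySem.List.pyGet?_natCast,
      List.getElem?_eq_getElem hkr, List.getD_eq_getElem?_getD,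
      List.getElem?_eq_getElem hka]

-- the row-wise fold of Source B equals the column description
theorem pv_fold_rows :
    ∀ (vs : List (List (Int × Int))) (acc : List (Int × Int)),
      (∀ r ∈ vs, acc.length ≤ r.length) →
      vs.foldl pvMergeRow acc
        = (List.range acc.length).map (fun k => pvCol vs (acc.getD k (0, 0)) k) := by
  intro vs
  induction vs with
  | nil =>
    intro acc _
    apply List.ext_getElem
    · simp
    · intro k hk hk'
      have hka : k < acc.length := by simpa using hk
      simp [pvCol, List.getD_eq_getElem?_getD, List.getElem?_eq_getElem hka]
  | cons r rs ih =>
    intro acc hlen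
    have hr : acc.length ≤ r.length := hlen r (by simp)
    rw [List.foldl_cons, pv_merge_char acc r hr]
    rw [ih _ (by intro x hx; simpa using hlen x (by simp [hx]))]
    simp only [List.length_map, List.length_range]
    apply List.map_congr_left
    intro k hk
    have hka : k < acc.length := List.mem_range.mp hk
    rw [List.getD_eq_getElem?_getD, List.getElem?_map,
        List.getElem?_range hka]
    simp [pvCol, List.getD_eq_getElem?_getD, List.getElem?_eq_getElem hka]

-- A also equals the column description
theorem pv_A_char (v : List (Int × Int)) (vs : List (List (Int × Int)))
    (hlen : ∀ l ∈ v :: vs, v.length ≤ l.length) :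
    reduce_to_largest_ranges (v :: vs)
      = (List.range v.length).map (fun k => pvCol vs (v.getD k (0, 0)) k) := by
  unfold reduce_to_largest_ranges
  simp only [List.headD_cons]
  rw [pv_foldl_append_map, List.nil_append, PySem.List.pyRange_zero_nat, List.map_map]
  apply List.map_congr_left
  intro k hk
  simp only [Function.comp]
  have hk' : k < v.length := List.mem_range.mp hk
  have hget : ∀ inner ∈ v :: vs, PySem.List.pyGet? inner (k : Int) = some (inner.getD k (0, 0)) := by
    intro inner hinner
    have hkl : k < inner.length := lt_of_lt_of_le hk' (hlen inner hinner)
    rw [PySem.List.pyGet?_natCast]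
    simp [List.getElem?_eq_getElem hkl, List.getD_eq_getElem?_getD]
  have hfold :
      (v :: vs).foldl (fun (mv : Option Int × Option Int) inner_list =>
        match PySem.List.pyGet? inner_list (k : Int) with
        | some (x1, x2) =>
          (some (match mv.1 with | none => x1 | some m => min m x1),
           some (match mv.2 with | none => x2 | some m => max m x2))
        | none => mv) (none, none)
      = ((v :: vs).map (fun inner => inner.getD k (0, 0))).foldl
          (fun (mv : Option Int × Option Int) (p : Int × Int) =>
            (some (match mv.1 with | none => p.1 | some m => min m p.1),
             some (match mv.2 with | none => p.2 | some m => max m p.2))) (none, none) := by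
    rw [List.foldl_map]
    apply PySem.List.foldl_congr_mem
    intro mv inner hinner
    rw [hget inner hinner]
  rw [hfold, List.map_cons, List.foldl_cons, pv_fold_some, List.foldl_map, List.foldl_map]
  simp [pvCol]

-- ===== VERDICT (by name: the statement is the Claim_ definition above) =====
theorem reduce_to_largest_ranges_spec : Claim_equal_reduce_to_largest_ranges := by
  intro values _ hpre
  obtain ⟨hne, hlen⟩ := hpre
  obtain ⟨v, vs, rfl⟩ := List.exists_cons_of_ne_nil hne
  simp only [List.headD_cons] at hlen
  unfold Spec_reduce_to_largest_ranges
  rw [pv_A_char v vs hlen]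
  rw [show reduce_to_largest_ranges_alt (v :: vs)
        = vs.foldl pvMergeRow (v.map (fun p => (p.1, p.2))) from rfl]
  have hid : v.map (fun p => (p.1, p.2)) = v := by simp
  rw [hid, pv_fold_rows vs v (by intro r hr; exact hlen r (by simp [hr]))]
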